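-- pv_equiv track=rewrite | github.com/LidiyaHvan/2019-2-level-labs | lab_4/main.py | clean_tokenize_corpus
-- ===== SOURCE A (Python) =====
-- def clean_tokenize_corpus(texts: list) -> list:
--     if not isinstance(texts, list) or not texts:
--         return []
--     clean_tokenize_corpus = []
--     for text in texts:
--         if isinstance(text, str):
--             if '<br />' in text:
--                 text = text.replace('<br />', ' ')
--             new_text = ''
--             for elm in text:
--                 if elm.isalpha() or elm == ' ':
--                     new_text += elm
--             new_text = new_text.lower()
--             pre_corpus = new_text.split(' ')
--             corpus1 = []
--             for word in pre_corpus: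
--                 if word != '':
--                     corpus1.append(word)
--             clean_tokenize_corpus.append(corpus1)
--     return clean_tokenize_corpus
-- ===== SOURCE B (Python) =====
-- def clean_tokenize_corpus(texts: list) -> list:
--     if not isinstance(texts, list) or not texts:
--         return []
--     result = []
--     for text in texts:
--         if isinstance(text, str):
--             if '<br />' in text:
--                 text = text.replace('<br />', ' ')
--             words = []
--             current = []
--             for ch in text:
--                 if ch.isalpha():
--                     current.append(ch.lower())
--                 elif ch == ' ':
--                     if current:
--                         words.append(''.join(current))
--                         current = []
--             if current:
--                 words.append(''.join(current))
--             result.append(words)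
--     return result
-- ===== Notes on version B (the rewrite author's own statement) =====
-- stated objective: alternative
-- what changed: Replaces A's build-filtered-string, lowercase, split-on-space, drop-empties pipeline per text with a single character pass that maintains a current-word buffer and flushes it on spaces and at the end.
import Mathlib
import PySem

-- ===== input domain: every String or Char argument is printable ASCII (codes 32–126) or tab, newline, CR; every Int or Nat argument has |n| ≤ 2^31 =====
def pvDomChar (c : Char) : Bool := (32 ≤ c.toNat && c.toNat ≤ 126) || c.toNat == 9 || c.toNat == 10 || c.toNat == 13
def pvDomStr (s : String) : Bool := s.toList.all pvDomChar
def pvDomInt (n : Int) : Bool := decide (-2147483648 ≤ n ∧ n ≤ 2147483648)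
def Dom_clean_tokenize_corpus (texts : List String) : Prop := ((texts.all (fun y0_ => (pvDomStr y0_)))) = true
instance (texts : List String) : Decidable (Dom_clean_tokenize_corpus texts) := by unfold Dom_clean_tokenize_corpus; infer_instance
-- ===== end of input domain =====

-- B tokenizes each text in a single character pass with a word buffer, instead of A's
-- build-filtered-string / lower / split-on-space / drop-empties pipeline (objective: alternative).
-- The Python `isinstance` checks are always true under the list[str] typing and disappear in the ports.

-- ===== PORT A =====
def pvKeep (c : Char) : Bool := PySem.Chars.isalpha c || c == ' '

-- transliteration of A's per-text body (Python strings carried as List Char, converted at the end)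
def pvCleanA (text : String) : List String :=
  let text1 := if PySem.Str.isIn "<br />" text then PySem.Str.replace text "<br />" " " else text
  let new_text : List Char :=
    text1.toList.foldl (fun acc elm => if pvKeep elm then acc ++ [elm] else acc) []
  let new_text2 := PySem.Chars.lower new_text
  let pre_corpus := PySem.Chars.splitOn new_text2 [' ']
  let corpus1 := pre_corpus.foldl (fun acc word => if word ≠ [] then acc ++ [word] else acc) []
  corpus1.map String.ofList

def clean_tokenize_corpus (texts : List String) : List (List String) :=
  if texts.isEmpty then []
  else texts.foldl (fun acc text => acc ++ [pvCleanA text]) []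

-- ===== PORT B =====
-- B's loop state: (words so far, current word buffer)
def pvStepB (st : List (List Char) × List Char) (ch : Char) : List (List Char) × List Char :=
  if PySem.Chars.isalpha ch then (st.1, st.2 ++ [PySem.Chars.lowerChar ch])
  else if ch == ' ' then (if st.2 ≠ [] then (st.1 ++ [st.2], []) else st)
  else st

-- trailing flush of the word buffer
def pvFin (st : List (List Char) × List Char) : List (List Char) :=
  if st.2 ≠ [] then st.1 ++ [st.2] else st.1

def pvCleanB (text : String) : List String :=
  let text1 := if PySem.Str.isIn "<br />" text then PySem.Str.replace text "<br />" " " else text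
  let st := text1.toList.foldl pvStepB ([], [])
  (pvFin st).map String.ofList

def clean_tokenize_corpus_alt (texts : List String) : List (List String) :=
  if texts.isEmpty then []
  else texts.foldl (fun acc text => acc ++ [pvCleanB text]) []

-- ===== PRECONDITION & SPEC =====
def Spec_clean_tokenize_corpus (texts : List String) (out : List (List String)) : Prop := out = clean_tokenize_corpus_alt texts
instance (texts : List String) (out : List (List String)) : Decidable (Spec_clean_tokenize_corpus texts out) := by unfold Spec_clean_tokenize_corpus; infer_instance

-- ===== CLAIM (what is proved, stated in full; the proofs are below) =====
def Claim_equal_clean_tokenize_corpus : Prop := ∀ (texts : List String), Dom_clean_tokenize_corpus texts → Spec_clean_tokenize_corpus texts (clean_tokenize_corpus texts)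

-- ===== LEMMAS AND PROOFS =====

-- the maximal-word tokenizer B's loop computes
def pvTok : List Char → List Char → List (List Char)
  | cur, [] => if cur = [] then [] else [cur]
  | cur, c :: cs =>
    if PySem.Chars.isalpha c then pvTok (cur ++ [PySem.Chars.lowerChar c]) cs
    else if c = ' ' then (if cur = [] then pvTok [] cs else cur :: pvTok [] cs)
    else pvTok cur cs

-- the same tokenizer over an already filtered-and-lowered list (splitting decided by ' ')
def pvTokC : List Char → List Char → List (List Char)
  | cur, [] => if cur = [] then [] else [cur]
  | cur, c :: cs =>
    if c = ' ' then (if cur = [] then pvTokC [] cs else cur :: pvTokC [] cs)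
    else pvTokC (cur ++ [c]) cs

-- split on ' ' with a reversed current-piece accumulator (what splitOn.go computes)
def pvSp : List Char → List Char → List (List Char)
  | cur, [] => [cur.reverse]
  | cur, c :: cs => if c = ' ' then cur.reverse :: pvSp [] cs else pvSp (c :: cur) cs

theorem pv_lower_ne_space (c : Char) (h : PySem.Chars.isalpha c = true) :
    PySem.Chars.lowerChar c ≠ ' ' := by
  simp [PySem.Chars.isalpha, PySem.Chars.isupper, PySem.Chars.islower] at h
  unfold PySem.Chars.lowerChar PySem.Chars.isupper
  rcases h with ⟨h1, h2⟩ | ⟨h1, h2⟩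
  · have n1 : 65 ≤ c.toNat := Fin.mk_le_mk.mp h1
    have n2 : c.toNat ≤ 90 := Fin.mk_le_mk.mp h2
    simp [h1, h2]
    intro hc
    have h3 := congrArg Char.toNat hc
    rw [Char.toNat_ofNat] at h3
    rw [if_pos (by left; omega)] at h3
    have : ' '.toNat = 32 := by decide
    omega
  · have n1 : 97 ≤ c.toNat := Fin.mk_le_mk.mp h1
    have hu : ¬ ('A' ≤ c ∧ c ≤ 'Z') := by
      rintro ⟨_, hZ⟩
      have h3 : c.toNat ≤ 'Z'.toNat := Fin.mk_le_mk.mp hZ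
      have : 'Z'.toNat = 90 := by decide
      omega
    split
    · next hh => simp at hh; exact absurd hh hu
    · intro hc; rw [hc] at n1; exact absurd n1 (by decide)

theorem pv_go_spec (cs : List Char) : ∀ (fuel : Nat) (cur : List Char) (acc : List (List Char)),
    cs.length ≤ fuel →
    PySem.Chars.splitOn.go [' '] fuel cs cur acc = acc.reverse ++ pvSp cur cs := by
  induction cs with
  | nil =>
    intro fuel cur acc _
    cases fuel <;> simp [PySem.Chars.splitOn.go, pvSp]
  | cons c cs ih =>
    intro fuel cur acc hlen
    cases fuel with
    | zero => simp at hlen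
    | succ fuel =>
      simp only [PySem.Chars.splitOn.go]
      by_cases hc : c = ' '
      · subst hc
        rw [if_pos (by simp [List.isPrefixOf])]
        have hdrop : List.drop [' '].length (' ' :: cs) = cs := rfl
        rw [hdrop, ih fuel [] (cur.reverse :: acc) (by simpa using hlen)]
        simp [pvSp]
      · rw [if_neg (by simp [List.isPrefixOf]; intro h; exact absurd h.symm hc)]
        rw [ih fuel (c :: cur) acc (by simpa using hlen)]
        simp [pvSp, hc]

theorem pv_splitOn_space (l : List Char) :
    PySem.Chars.splitOn l [' '] = pvSp [] l := by
  unfold PySem.Chars.splitOn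
  rw [pv_go_spec l (l.length + 1) [] [] (by omega)]
  simp

theorem pv_foldNE_pvSp (l : List Char) : ∀ (cur : List Char) (acc : List (List Char)),
    (pvSp cur l).foldl (fun acc word => if word ≠ [] then acc ++ [word] else acc) acc
      = acc ++ pvTokC cur.reverse l := by
  induction l with
  | nil =>
    intro cur acc
    simp only [pvSp, pvTokC, List.foldl]
    by_cases h : cur.reverse = [] <;> simp [h]
  | cons c cs ih =>
    intro cur acc
    by_cases hc : c = ' '
    · subst hc
      rw [show pvSp cur (' ' :: cs) = cur.reverse :: pvSp [] cs from by simp [pvSp]]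
      rw [show pvTokC cur.reverse (' ' :: cs)
            = (if cur.reverse = [] then pvTokC [] cs else cur.reverse :: pvTokC [] cs) from by
          simp [pvTokC]]
      simp only [List.foldl_cons]
      rw [ih []]
      by_cases h2 : cur.reverse = [] <;> simp [h2]
    · rw [show pvSp cur (c :: cs) = pvSp (c :: cur) cs from by simp [pvSp, hc]]
      rw [show pvTokC cur.reverse (c :: cs) = pvTokC (cur.reverse ++ [c]) cs from by
        simp [pvTokC, hc]]
      rw [ih (c :: cur)]
      simp

theorem pv_tok_bridge (cs : List Char) : ∀ (cur : List Char),
    pvTok cur cs = pvTokC cur ((cs.filter pvKeep).map PySem.Chars.lowerChar) := by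
  induction cs with
  | nil => intro cur; simp [pvTok, pvTokC]
  | cons c cs ih =>
    intro cur
    by_cases ha : PySem.Chars.isalpha c = true
    · have hk : pvKeep c = true := by simp [pvKeep, ha]
      rw [show pvTok cur (c :: cs) = pvTok (cur ++ [PySem.Chars.lowerChar c]) cs from by
        simp [pvTok, ha]]
      rw [ih, show ((c :: cs).filter pvKeep).map PySem.Chars.lowerChar
            = PySem.Chars.lowerChar c :: (cs.filter pvKeep).map PySem.Chars.lowerChar from by
          simp [hk]]
      rw [show pvTokC cur (PySem.Chars.lowerChar c :: (cs.filter pvKeep).map PySem.Chars.lowerChar)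
            = pvTokC (cur ++ [PySem.Chars.lowerChar c]) ((cs.filter pvKeep).map PySem.Chars.lowerChar)
          from by simp [pvTokC, pv_lower_ne_space c ha]]
    · by_cases hc : c = ' '
      · subst hc
        have ha' : PySem.Chars.isalpha ' ' = false := by decide
        have hk : pvKeep ' ' = true := by decide
        rw [show pvTok cur (' ' :: cs)
              = (if cur = [] then pvTok [] cs else cur :: pvTok [] cs) from by simp [pvTok, ha']]
        rw [show ((' ' :: cs).filter pvKeep).map PySem.Chars.lowerChar
              = ' ' :: (cs.filter pvKeep).map PySem.Chars.lowerChar from by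
            simp [hk]
            decide]
        rw [show pvTokC cur (' ' :: (cs.filter pvKeep).map PySem.Chars.lowerChar)
              = (if cur = [] then pvTokC [] ((cs.filter pvKeep).map PySem.Chars.lowerChar)
                 else cur :: pvTokC [] ((cs.filter pvKeep).map PySem.Chars.lowerChar)) from by
            simp [pvTokC]]
        by_cases h2 : cur = [] <;> simp [h2, ih]
      · have hk : pvKeep c = false := by simp [pvKeep, ha, hc]
        rw [show pvTok cur (c :: cs) = pvTok cur cs from by simp [pvTok, ha, hc]]
        rw [show (c :: cs).filter pvKeep = cs.filter pvKeep from by simp [hk]]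
        exact ih cur

theorem pvStepB_alpha (st : List (List Char) × List Char) (c : Char)
    (ha : PySem.Chars.isalpha c = true) :
    pvStepB st c = (st.1, st.2 ++ [PySem.Chars.lowerChar c]) := by simp [pvStepB, ha]

theorem pvStepB_space (st : List (List Char) × List Char) :
    pvStepB st ' ' = (if st.2 ≠ [] then (st.1 ++ [st.2], []) else st) := by
  simp [pvStepB, show PySem.Chars.isalpha ' ' = false from by decide]

theorem pvStepB_other (st : List (List Char) × List Char) (c : Char)
    (ha : PySem.Chars.isalpha c = false) (hc : c ≠ ' ') : pvStepB st c = st := by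
  simp [pvStepB, ha, hc]

theorem pv_foldB (cs : List Char) : ∀ (words : List (List Char)) (cur : List Char),
    pvFin (cs.foldl pvStepB (words, cur)) = words ++ pvTok cur cs := by
  induction cs with
  | nil =>
    intro words cur
    simp only [List.foldl_nil, pvFin, pvTok]
    by_cases h : cur = [] <;> simp [h]
  | cons c cs ih =>
    intro words cur
    simp only [List.foldl_cons]
    by_cases ha : PySem.Chars.isalpha c = true
    · rw [pvStepB_alpha _ c ha]
      rw [show pvTok cur (c :: cs) = pvTok (cur ++ [PySem.Chars.lowerChar c]) cs from by
        simp [pvTok, ha]]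
      exact ih words (cur ++ [PySem.Chars.lowerChar c])
    · by_cases hc : c = ' '
      · subst hc
        rw [pvStepB_space]
        have ha' : PySem.Chars.isalpha ' ' = false := by decide
        rw [show pvTok cur (' ' :: cs)
              = (if cur = [] then pvTok [] cs else cur :: pvTok [] cs) from by simp [pvTok, ha']]
        by_cases h2 : cur = []
        · simp only [h2, ne_eq, not_true_eq_false, if_false]
          exact ih words []
        · simp only [ne_eq, h2, not_false_eq_true, if_true]
          rw [ih (words ++ [cur]) []]
          simp
      · rw [pvStepB_other _ c (by simpa using ha) hc]
        rw [show pvTok cur (c :: cs) = pvTok cur cs from by simp [pvTok, ha, hc]]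
        exact ih words cur

theorem pv_clean_eq (t : String) : pvCleanA t = pvCleanB t := by
  simp only [pvCleanA, pvCleanB]
  set t1 := if PySem.Str.isIn "<br />" t then PySem.Str.replace t "<br />" " " else t with ht1
  have hfa : t1.toList.foldl (fun acc elm => if pvKeep elm then acc ++ [elm] else acc) []
      = t1.toList.filter pvKeep := by
    simpa using PySem.List.foldl_append_if pvKeep id t1.toList []
  rw [hfa, pv_splitOn_space, pv_foldNE_pvSp _ [] [], pv_foldB t1.toList [] []]
  rw [pv_tok_bridge]
  rfl

-- ===== VERDICT (by name: the statement is the Claim_ definition above) =====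
theorem clean_tokenize_corpus_spec : Claim_equal_clean_tokenize_corpus := by
  intro texts _
  unfold Spec_clean_tokenize_corpus clean_tokenize_corpus clean_tokenize_corpus_alt
  by_cases h : texts.isEmpty
  · simp [h]
  · simp only [h]
    rw [PySem.List.foldl_append_singleton_eq_map pvCleanA texts [],
      PySem.List.foldl_append_singleton_eq_map pvCleanB texts []]
    simp [pv_clean_eq]
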